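-- pv_equiv track=rewrite | github.com/ericmerle3789/Collatz-Junction-Theorem | scripts/research/r57_cross_bilinear.py | find_R1_primes
-- ===== SOURCE A (Python) =====
-- from math import comb, gcd, ceil, log2, sqrt, pi, cos, sin, log
--
-- def compute_S(k):
--     """Minimal S such that 2^S > 3^k. Exact via integer comparison."""
--     S = ceil(k * log2(3))
--     three_k = 3 ** k
--     while (1 << S) <= three_k:
--         S += 1
--     while S > 0 and (1 << (S - 1)) > three_k:
--         S -= 1
--     return S
--
-- def compute_max_B(k):
--     return compute_S(k) - k
--
-- def ord_mod(base, m):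
--     if m <= 1 or gcd(base, m) != 1:
--         return None
--     o = 1
--     v = base % m
--     while v != 1:
--         o += 1
--         v = (v * base) % m
--         if o > m:
--             return None
--     return o
--
-- def is_prime(n):
--     if n < 2:
--         return False
--     if n < 4:
--         return True
--     if n % 2 == 0 or n % 3 == 0:
--         return False
--     i = 5
--     while i * i <= n:
--         if n % i == 0 or n % (i + 2) == 0:
--             return False
--         i += 6
--     return True
--
-- def classify_regime(k, p):
--     max_B = compute_max_B(k)
--     ord2 = ord_mod(2, p)
--     if ord2 is None:
--         return 'R_gen', ord2
--     if ord2 >= max_B + 1: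
--         return 'R1', ord2
--     else:
--         return 'R_gen', ord2
--
-- def find_R1_primes(k, max_p=500, max_count=6):
--     """Find primes p in R1 for given k, up to max_p, at most max_count."""
--     max_B = compute_max_B(k)
--     primes = []
--     for p in range(5, max_p):
--         if not is_prime(p) or p == 2 or p == 3:
--             continue
--         regime, ord2 = classify_regime(k, p)
--         if regime == 'R1':
--             primes.append(p)
--             if len(primes) >= max_count:
--                 break
--     return primes
-- ===== SOURCE B (Python) =====
-- from math import comb, gcd, ceil, log2, sqrt, pi, cos, sin, log
--
-- def compute_S(k):
--     """Minimal S such that 2^S > 3^k. Exact via integer comparison."""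
--     S = ceil(k * log2(3))
--     three_k = 3 ** k
--     while (1 << S) <= three_k:
--         S += 1
--     while S > 0 and (1 << (S - 1)) > three_k:
--         S -= 1
--     return S
--
-- def compute_max_B(k):
--     return compute_S(k) - k
--
-- def ord_mod(base, m):
--     if m <= 1 or gcd(base, m) != 1:
--         return None
--     o = 1
--     v = base % m
--     while v != 1:
--         o += 1
--         v = (v * base) % m
--         if o > m:
--             return None
--     return o
--
-- def classify_regime(k, p):
--     max_B = compute_max_B(k)
--     ord2 = ord_mod(2, p)
--     if ord2 is None:
--         return 'R_gen', ord2
--     if ord2 >= max_B + 1: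
--         return 'R1', ord2
--     else:
--         return 'R_gen', ord2
--
-- def sieve_upto(n):
--     """Boolean primality table for [0, n) by the sieve of Eratosthenes."""
--     sieve = [i >= 2 for i in range(n)]
--     i = 2
--     while i * i < n:
--         for j in range(i * i, n, i):
--             sieve[j] = False
--         i += 1
--     return sieve
--
-- def find_R1_primes(k, max_p=500, max_count=6):
--     """Sieve-based: precompute primality with a (doubling) sieve table, then scan."""
--     primes = []
--     lo = 5
--     while lo < max_p:
--         hi = min(lo * 2, max_p)
--         sieve = sieve_upto(hi)
--         for p in range(lo, hi):
--             if sieve[p]: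
--                 regime, ord2 = classify_regime(k, p)
--                 if regime == 'R1':
--                     primes.append(p)
--                     if len(primes) >= max_count:
--                         return primes
--         lo = hi
--     return primes
-- ===== Notes on version B (the rewrite author's own statement) =====
-- stated objective: alternative
-- what changed: A tests each candidate in [5, max_p) with 6k±1 trial division; B precomputes primality tables with a Sieve of Eratosthenes over doubling segments [0, hi), hi <= max_p, scanning each segment and stopping at max_count, keeping compute_S/ord_mod/classify_regime identical.
-- crash fix: For k < 0 A raises ValueError ('negative shift count' in compute_S); when additionally max_p <= 5 the scan range is empty and B returns []. — e.g. on find_R1_primes(-1, 5, 6): A raises ValueError, B returns []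
import Mathlib
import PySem

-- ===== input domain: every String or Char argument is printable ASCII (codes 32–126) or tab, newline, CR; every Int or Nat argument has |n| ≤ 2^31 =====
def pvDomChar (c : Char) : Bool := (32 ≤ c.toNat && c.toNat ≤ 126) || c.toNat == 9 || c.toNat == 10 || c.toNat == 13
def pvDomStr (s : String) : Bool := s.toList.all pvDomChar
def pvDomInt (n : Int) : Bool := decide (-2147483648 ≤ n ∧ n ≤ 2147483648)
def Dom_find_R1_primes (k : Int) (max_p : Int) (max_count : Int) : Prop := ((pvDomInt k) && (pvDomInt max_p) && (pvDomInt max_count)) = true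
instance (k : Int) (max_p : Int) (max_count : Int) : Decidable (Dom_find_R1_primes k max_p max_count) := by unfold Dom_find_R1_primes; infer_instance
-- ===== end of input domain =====

-- B replaces A's per-candidate 6k±1 trial-division primality test by Sieve of
-- Eratosthenes tables over doubling segments (stopping at max_count); same
-- return value on Pre_ (0 ≤ k).

-- ===== shared helpers (identical code in A's module and in Source B) =====

-- Python's compute_S seeds S with the float estimate ceil(k*log2(3)) and then
-- corrects it with two exact integer-comparison loops; its result is exactly
-- the minimal S with 2^S > 3^k.  Floats are not portable, so this helper
-- computes that minimal S by exact integer binary search (invariant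
-- 2^lo ≤ 3^k < 2^hi); exact for k ≥ 0.  For k < 0 Python raises ValueError
-- (excluded by Pre_).
def sSearch (t : Int) : Nat → Int → Int → Int
  | 0, _, hi => hi
  | fuel + 1, lo, hi =>
    if hi - lo ≤ 1 then hi
    else
      let mid := (lo + hi) / 2
      if t < 2 ^ mid.toNat then sSearch t fuel lo mid else sSearch t fuel mid hi

def compute_S (k : Int) : Int :=
  if k < 0 then 0
  else sSearch ((3:Int) ^ k.toNat) 64 0 (2 * k + 2)

def compute_max_B (k : Int) : Int := compute_S k - k

-- while v != 1: o += 1; v = (v*base) % m; if o > m: return None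
-- o strictly increases and the loop aborts as soon as o > m, so m.toNat + 2
-- fuel is never exhausted; fuel 0 is unreachable.
def ordLoop (base m : Int) : Nat → Int → Int → Option Int
  | 0, _, _ => none
  | fuel + 1, o, v =>
    if v = 1 then some o
    else
      let o' := o + 1
      let v' := PySem.Int.mod (v * base) m
      if m < o' then none else ordLoop base m fuel o' v'

def ord_mod (base m : Int) : Option Int :=
  if m ≤ 1 ∨ Int.gcd base m ≠ 1 then none
  else ordLoop base m (m.toNat + 2) 1 (PySem.Int.mod base m)

def classify_regime (k p : Int) : String × Option Int :=
  let max_B := compute_max_B k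
  match ord_mod 2 p with
  | none => ("R_gen", none)
  | some o => if max_B + 1 ≤ o then ("R1", some o) else ("R_gen", some o)

-- ===== PORT A =====

-- while i*i <= n: if n%i==0 or n%(i+2)==0: return False; i += 6
-- i starts at 5 and grows by 6 while i*i ≤ n (so i ≤ n), hence n.toNat fuel is
-- never exhausted; fuel 0 is unreachable.
def trialLoop (n : Int) : Nat → Int → Bool
  | 0, _ => true
  | fuel + 1, i =>
    if i * i ≤ n then
      if PySem.Int.mod n i = 0 ∨ PySem.Int.mod n (i + 2) = 0 then false
      else trialLoop n fuel (i + 6)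
    else true

def is_prime (n : Int) : Bool :=
  if n < 2 then false
  else if n < 4 then true
  else if PySem.Int.mod n 2 = 0 ∨ PySem.Int.mod n 3 = 0 then false
  else trialLoop n n.toNat 5

-- for p in range(5, max_p): …  with 'continue' and with 'break' once
-- len(primes) >= max_count.  Python's range is LAZY and the loop can break
-- early, so it is ported as recursion on the loop variable p itself
-- ((max_p - 5).toNat fuel covers every iteration; fuel 0 is unreachable).
def scanA (k max_count max_p : Int) : Nat → Int → List Int → List Int
  | 0, _, primes => primes
  | fuel + 1, p, primes =>
    if max_p ≤ p then primes
    else if ¬ is_prime p = true ∨ p = 2 ∨ p = 3 then scanA k max_count max_p fuel (p + 1) primes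
    else
      match classify_regime k p with
      | (regime, _ord2) =>
        if regime = "R1" then
          let primes' := primes ++ [p]
          if max_count ≤ (primes'.length : Int) then primes'
          else scanA k max_count max_p fuel (p + 1) primes'
        else scanA k max_count max_p fuel (p + 1) primes

def find_R1_primes (k : Int) (max_p : Int) (max_count : Int) : List Int :=
  let _max_B := compute_max_B k   -- Python computes it here (value unused below)
  scanA k max_count max_p (max_p - 5).toNat 5 []

-- ===== PORT B =====

-- sieve[j] = False: the written index satisfies 0 ≤ i*i ≤ j < n = len(sieve),
-- so setIfInBounds always hits (exactly Python's in-range list assignment).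
def sieveMark (n : Int) : Nat → Int → Array Bool → Array Bool
  | 0, _, s => s
  | fuel + 1, i, s =>
    if i * i < n then
      sieveMark n fuel (i + 1)
        ((PySem.List.pyRange (i * i) n i).foldl (fun t j => t.setIfInBounds j.toNat false) s)
    else s

-- sieve_upto(n): i grows by 1 while i*i < n (so i < n), hence n.toNat fuel is
-- never exhausted; fuel 0 is unreachable.
def sieve_upto (n : Int) : Array Bool :=
  sieveMark n n.toNat 2 (((PySem.List.pyRange 0 n 1).map (fun i => decide ((2 : Int) ≤ i))).toArray)

-- for p in range(lo, hi): if sieve[p]: …  (index p is in range: 5 ≤ p < hi = len(sieve));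
-- the Bool result records whether 'return primes' fired (max_count reached).
def scanSeg (k max_count : Int) (sieve : Array Bool) : List Int → List Int → List Int × Bool
  | [], primes => (primes, false)
  | p :: rest, primes =>
    if sieve.getD p.toNat false then
      match classify_regime k p with
      | (regime, _ord2) =>
        if regime = "R1" then
          let primes' := primes ++ [p]
          if max_count ≤ (primes'.length : Int) then (primes', true)
          else scanSeg k max_count sieve rest primes'
        else scanSeg k max_count sieve rest primes
    else scanSeg k max_count sieve rest primes

-- while lo < max_p: … lo = hi.  lo strictly increases each round, so
-- (max_p - 5).toNat fuel is never exhausted; fuel 0 is unreachable.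
def roundsB (k max_count max_p : Int) : Nat → Int → List Int → List Int
  | 0, _, primes => primes
  | fuel + 1, lo, primes =>
    if lo < max_p then
      let hi := min (lo * 2) max_p
      match scanSeg k max_count (sieve_upto hi) (PySem.List.pyRange lo hi 1) primes with
      | (primes', true) => primes'
      | (primes', false) => roundsB k max_count max_p fuel hi primes'
    else primes

def find_R1_primes_alt (k : Int) (max_p : Int) (max_count : Int) : List Int :=
  roundsB k max_count max_p (max_p - 5).toNat 5 []

-- ===== PRECONDITION & SPEC =====

-- Pre_ excludes k < 0, on which Python A raises ValueError ('negative shift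
-- count' inside compute_S).
def Pre_find_R1_primes (k : Int) (max_p : Int) (max_count : Int) : Prop := 0 ≤ k
instance (k : Int) (max_p : Int) (max_count : Int) : Decidable (Pre_find_R1_primes k max_p max_count) := by unfold Pre_find_R1_primes; infer_instance

def pvWitness_find_R1_primes : Int × Int × Int := (3, 20, 6)

-- A raises ValueError (negative shift count) whenever k < 0; when additionally
-- max_p ≤ 5 the scan range is empty, so B never classifies a prime and returns [].
def Raises_find_R1_primes (k : Int) (max_p : Int) (max_count : Int) : Prop := k < 0 ∧ max_p ≤ 5
instance (k : Int) (max_p : Int) (max_count : Int) : Decidable (Raises_find_R1_primes k max_p max_count) := by unfold Raises_find_R1_primes; infer_instance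
def pvRaiseWitness_find_R1_primes : Int × Int × Int := (-1, 5, 6)
def pvRaiseWitnessOut_find_R1_primes : List Int := []

def Spec_find_R1_primes (k : Int) (max_p : Int) (max_count : Int) (out : List Int) : Prop := out = find_R1_primes_alt k max_p max_count
instance (k : Int) (max_p : Int) (max_count : Int) (out : List Int) : Decidable (Spec_find_R1_primes k max_p max_count out) := by unfold Spec_find_R1_primes; infer_instance

-- ===== CLAIM (what is proved, stated in full; the proofs are below) =====
def Claim_equal_find_R1_primes : Prop := ∀ (k : Int) (max_p : Int) (max_count : Int), Dom_find_R1_primes k max_p max_count → Pre_find_R1_primes k max_p max_count → Spec_find_R1_primes k max_p max_count (find_R1_primes k max_p max_count)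

def Claim_raises_find_R1_primes : Prop := (∀ (k : Int) (max_p : Int) (max_count : Int), Dom_find_R1_primes k max_p max_count → Raises_find_R1_primes k max_p max_count → ¬ Pre_find_R1_primes k max_p max_count) ∧ (Dom_find_R1_primes (pvRaiseWitness_find_R1_primes.1) (pvRaiseWitness_find_R1_primes.2.1) (pvRaiseWitness_find_R1_primes.2.2) ∧ Raises_find_R1_primes (pvRaiseWitness_find_R1_primes.1) (pvRaiseWitness_find_R1_primes.2.1) (pvRaiseWitness_find_R1_primes.2.2) ∧ find_R1_primes_alt (pvRaiseWitness_find_R1_primes.1) (pvRaiseWitness_find_R1_primes.2.1) (pvRaiseWitness_find_R1_primes.2.2) = pvRaiseWitnessOut_find_R1_primes)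

-- ===== LEMMAS AND PROOFS =====

-- 'p has a divisor d with 2 ≤ d and d² ≤ p': the predicate both the trial
-- division of A and the sieve of B decide (for 5 ≤ p this is non-primality).
def SF (p : Int) : Prop := ∃ d : Int, 2 ≤ d ∧ d * d ≤ p ∧ d ∣ p

-- --- A's side: trial division decides SF ---

lemma trialLoop_iff (p : Int) (hp : 5 ≤ p) (h2 : ¬ (2:Int) ∣ p) (h3 : ¬ (3:Int) ∣ p) :
    ∀ (fuel : Nat) (i : Int), 5 ≤ i → i % 6 = 5 →
      (∀ d : Int, 2 ≤ d → d < i → ¬ d ∣ p) → (p - i).toNat ≤ fuel →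
      (trialLoop p fuel i = true ↔ ¬ SF p) := by
  intro fuel
  induction fuel with
  | zero =>
    intro i h5i hmod hinv hfuel
    have hpi : p ≤ i := by omega
    simp only [trialLoop, true_iff]
    rintro ⟨d, hd2, hdd, hdvd⟩
    by_cases hdi : d < i
    · exact hinv d hd2 hdi hdvd
    · nlinarith
  | succ fuel ih =>
    intro i h5i hmod hinv hfuel
    simp only [trialLoop]
    by_cases hii : i * i ≤ p
    · rw [if_pos hii]
      simp only [PySem.Int.mod_eq_zero_iff_dvd]
      by_cases hdvd : i ∣ p ∨ (i + 2) ∣ p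
      · rw [if_pos hdvd]
        have hSF : SF p := by
          rcases hdvd with h | h
          · exact ⟨i, by omega, hii, h⟩
          · by_cases hbig : (i + 2) * (i + 2) ≤ p
            · exact ⟨i + 2, by omega, hbig, h⟩
            · push Not at hbig
              obtain ⟨c, hc⟩ := h
              have hcpos : 1 ≤ c := by nlinarith
              have hc2 : 2 ≤ c := by
                rcases (by omega : c = 1 ∨ 2 ≤ c) with rfl | hc'
                · exfalso; nlinarith
                · exact hc'
              have hclt : c < i + 2 := by nlinarith
              exact ⟨c, hc2, by nlinarith, ⟨i + 2, by rw [hc]; ring⟩⟩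
        simp [hSF]
      · rw [if_neg hdvd]
        push Not at hdvd
        refine ih (i + 6) (by omega) (by omega) ?_ (by omega)
        intro d hd2 hdlt hddvd
        by_cases hdi : d < i
        · exact hinv d hd2 hdi hddvd
        · have hcase : d = i ∨ d = i + 2 ∨ 2 ∣ d ∨ 3 ∣ d := by omega
          rcases hcase with rfl | rfl | hdvd2 | hdvd3
          · exact hdvd.1 hddvd
          · exact hdvd.2 hddvd
          · exact h2 (dvd_trans hdvd2 hddvd)
          · exact h3 (dvd_trans hdvd3 hddvd)
    · rw [if_neg hii]
      push Not at hii
      simp only [true_iff]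
      rintro ⟨d, hd2, hdd, hdvd⟩
      by_cases hdi : d < i
      · exact hinv d hd2 hdi hdvd
      · nlinarith

lemma isPrime_iff (p : Int) (hp : 5 ≤ p) : (is_prime p = true ↔ ¬ SF p) := by
  unfold is_prime
  rw [if_neg (by omega), if_neg (by omega)]
  simp only [PySem.Int.mod_eq_zero_iff_dvd]
  by_cases h2 : (2:Int) ∣ p
  · rw [if_pos (Or.inl h2)]
    have hSF : SF p := ⟨2, le_refl 2, by omega, h2⟩
    simp [hSF]
  · by_cases h3 : (3:Int) ∣ p
    · rw [if_pos (Or.inr h3)]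
      have h9 : 9 ≤ p := by omega
      have hSF : SF p := ⟨3, by norm_num, by omega, h3⟩
      simp [hSF]
    · rw [if_neg (by tauto)]
      refine trialLoop_iff p hp h2 h3 p.toNat 5 (by norm_num) (by norm_num) ?_ (by omega)
      intro d hd2 hdlt hdvd
      have hcase : d = 2 ∨ d = 3 ∨ d = 4 := by omega
      rcases hcase with rfl | rfl | rfl
      · exact h2 hdvd
      · exact h3 hdvd
      · exact h2 (dvd_trans (by norm_num) hdvd)

-- --- B's side: the sieve decides SF ---

lemma getD_set_false (s : Array Bool) (i j : Nat) :
    (s.setIfInBounds i false).getD j false = if i = j then false else s.getD j false := by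
  by_cases h : i = j
  · subst h
    by_cases hl : i < s.size <;>
      simp [Array.getD_eq_getD_getElem?, hl]
  · simp [Array.getD_eq_getD_getElem?, h]

lemma foldl_set_getD_of_not_mem (l : List Int) :
    ∀ (s : Array Bool) (j : Nat), ((j : Int) ∉ l) → (∀ x ∈ l, 0 ≤ x) →
      (l.foldl (fun t x => t.setIfInBounds x.toNat false) s).getD j false = s.getD j false := by
  induction l with
  | nil => intro s j _ _; rfl
  | cons x xs ih =>
    intro s j hj hl
    have hx : (0:Int) ≤ x := hl x (by simp)
    have hxj : x.toNat ≠ j := by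
      intro h; apply hj; simp [List.mem_cons]; left; omega
    rw [List.foldl_cons, ih _ j (by intro h; exact hj (List.mem_cons_of_mem _ h))
        (fun y hy => hl y (List.mem_cons_of_mem _ hy)), getD_set_false, if_neg hxj]

lemma foldl_set_getD_false_stable (l : List Int) :
    ∀ (s : Array Bool) (j : Nat), s.getD j false = false →
      (l.foldl (fun t x => t.setIfInBounds x.toNat false) s).getD j false = false := by
  induction l with
  | nil => intro s j h; exact h
  | cons x xs ih =>
    intro s j h
    rw [List.foldl_cons]
    apply ih
    rw [getD_set_false]
    split
    · rfl
    · exact h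

lemma foldl_set_getD_of_mem (l : List Int) :
    ∀ (s : Array Bool) (j : Nat), ((j : Int) ∈ l) → (∀ x ∈ l, 0 ≤ x) →
      (l.foldl (fun t x => t.setIfInBounds x.toNat false) s).getD j false = false := by
  induction l with
  | nil => intro s j hj _; simp at hj
  | cons x xs ih =>
    intro s j hj hl
    rw [List.foldl_cons]
    rcases List.mem_cons.mp hj with h | h
    · apply foldl_set_getD_false_stable
      rw [getD_set_false, if_pos (by omega)]
    · exact ih _ j h (fun y hy => hl y (List.mem_cons_of_mem _ hy))

lemma sieveMark_getD (n : Int) :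
    ∀ (fuel : Nat) (i : Int) (s : Array Bool) (j : Int), 2 ≤ i → (n - i).toNat ≤ fuel →
      0 ≤ j → j < n →
      ((sieveMark n fuel i s).getD j.toNat false = true ↔
        (s.getD j.toNat false = true ∧ ¬ ∃ d : Int, i ≤ d ∧ d * d ≤ j ∧ d ∣ j)) := by
  intro fuel
  induction fuel with
  | zero =>
    intro i s j hi hfuel hj0 hjn
    have hni : n ≤ i := by omega
    simp only [sieveMark]
    have hno : ¬ ∃ d : Int, i ≤ d ∧ d * d ≤ j ∧ d ∣ j := by
      rintro ⟨d, hd, hdd, -⟩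
      nlinarith
    simp [hno]
  | succ fuel ih =>
    intro i s j hi hfuel hj0 hjn
    simp only [sieveMark]
    by_cases hiin : i * i < n
    · rw [if_pos hiin]
      have hin : i < n := by nlinarith
      have hpos : (0:Int) < i := by omega
      have hmem : ∀ x ∈ PySem.List.pyRange (i * i) n i, (0:Int) ≤ x := by
        intro x hx
        rcases (PySem.List.mem_pyRange_iff_of_pos hpos x).mp hx with ⟨h1, -, -⟩
        nlinarith
      have hjmem : ((j.toNat : Int) ∈ PySem.List.pyRange (i * i) n i) ↔ (i * i ≤ j ∧ i ∣ j) := by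
        have hii : i ∣ i * i := ⟨i, rfl⟩
        rw [Int.toNat_of_nonneg hj0, PySem.List.mem_pyRange_iff_of_pos hpos]
        constructor
        · rintro ⟨h1, -, h3⟩
          refine ⟨h1, ?_⟩
          have := dvd_add h3 hii
          simpa using this
        · rintro ⟨h1, h2⟩
          exact ⟨h1, hjn, dvd_sub h2 hii⟩
      rw [ih (i + 1) _ j (by omega) (by omega) hj0 hjn]
      by_cases hc : i * i ≤ j ∧ i ∣ j
      · have : (j.toNat : Int) ∈ PySem.List.pyRange (i * i) n i := hjmem.mpr hc
        rw [foldl_set_getD_of_mem _ _ _ this hmem]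
        constructor
        · rintro ⟨h, -⟩; exact absurd h (by simp)
        · rintro ⟨-, hno⟩
          exact absurd ⟨i, le_refl i, hc.1, hc.2⟩ hno
      · have : (j.toNat : Int) ∉ PySem.List.pyRange (i * i) n i := fun h => hc (hjmem.mp h)
        rw [foldl_set_getD_of_not_mem _ _ _ this hmem]
        constructor
        · rintro ⟨h, hno⟩
          refine ⟨h, ?_⟩
          rintro ⟨d, hd, hdd, hddvd⟩
          rcases eq_or_lt_of_le hd with heq | hlt
          · exact hc ⟨heq ▸ hdd, heq ▸ hddvd⟩
          · exact hno ⟨d, by omega, hdd, hddvd⟩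
        · rintro ⟨h, hno⟩
          exact ⟨h, fun ⟨d, hd, hdd, hddvd⟩ => hno ⟨d, by omega, hdd, hddvd⟩⟩
    · rw [if_neg hiin]
      have hno : ¬ ∃ d : Int, i ≤ d ∧ d * d ≤ j ∧ d ∣ j := by
        rintro ⟨d, hd, hdd, -⟩
        nlinarith
      simp [hno]

lemma sieve_getD (n j : Int) (h0 : 0 ≤ j) (hn : j < n) :
    ((sieve_upto n).getD j.toNat false = true ↔ (2 ≤ j ∧ ¬ SF j)) := by
  unfold sieve_upto
  rw [sieveMark_getD n n.toNat 2 _ j (by norm_num) (by omega) h0 hn]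
  have harr : ∀ (xs : List Bool) (m : Nat), xs.toArray.getD m false = xs.getD m false := by
    intro xs m
    simp [Array.getD_eq_getD_getElem?, List.getD_eq_getElem?_getD]
  rw [harr, ← PySem.List.pyGetD_of_nonneg _ false h0,
    PySem.List.pyGetD_map_pyRange_of_nonneg _ n j false h0 hn]
  unfold SF
  simp

-- --- the scans agree when the per-candidate conditions agree ---

lemma seg_eq (k max_count max_p hi : Int) (sieve : Array Bool) (hhi : hi ≤ max_p)
    (hcond : ∀ q : Int, 5 ≤ q → q < hi → sieve.getD q.toNat false = (is_prime q && !(q == 2) && !(q == 3))) :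
    ∀ (fuel : Nat) (lo : Int) (acc : List Int), 5 ≤ lo → lo ≤ hi → (hi - lo).toNat ≤ fuel →
      scanA k max_count max_p (max_p - lo).toNat lo acc =
        (match scanSeg k max_count sieve (PySem.List.pyRange lo hi 1) acc with
         | (acc', true) => acc'
         | (acc', false) => scanA k max_count max_p (max_p - hi).toNat hi acc') := by
  intro fuel
  induction fuel with
  | zero =>
    intro lo acc hlo5 hlohi hfuel
    have heq : lo = hi := by omega
    subst heq
    rw [PySem.List.pyRange_one_eq_nil (le_refl lo)]
    rfl
  | succ fuel ih =>
    intro lo acc hlo5 hlohi hfuel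
    by_cases heq : lo = hi
    · subst heq
      rw [PySem.List.pyRange_one_eq_nil (le_refl lo)]
      rfl
    · have hm : (max_p - lo).toNat = (max_p - (lo + 1)).toNat + 1 := by omega
      rw [hm]
      simp only [scanA]
      rw [if_neg (by omega : ¬ max_p ≤ lo), PySem.List.pyRange_one_cons (by omega)]
      simp only [scanSeg]
      rw [hcond lo hlo5 (by omega)]
      by_cases hc : ¬ is_prime lo = true ∨ lo = 2 ∨ lo = 3
      · rw [if_pos hc]
        have hb : (is_prime lo && !(lo == 2) && !(lo == 3)) = false := by
          rcases hc with h | h | h <;> simp [h]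
        rw [hb]
        simp only [Bool.false_eq_true, if_false]
        exact ih (lo + 1) acc (by omega) (by omega) (by omega)
      · rw [if_neg hc]
        push Not at hc
        have hb : (is_prime lo && !(lo == 2) && !(lo == 3)) = true := by
          simp [hc.1, hc.2.1, hc.2.2]
        rw [hb]
        simp only [if_true]
        cases hcr : classify_regime k lo with
        | mk regime o =>
          by_cases hr : regime = "R1"
          · rw [if_pos hr, if_pos hr]
            by_cases hlen : max_count ≤ ((acc ++ [lo]).length : Int)
            · rw [if_pos hlen, if_pos hlen]
            · rw [if_neg hlen, if_neg hlen]
              exact ih (lo + 1) _ (by omega) (by omega) (by omega)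
          · rw [if_neg hr, if_neg hr]
            exact ih (lo + 1) acc (by omega) (by omega) (by omega)

lemma rounds_eq (k max_count max_p : Int) :
    ∀ (fuel : Nat) (lo : Int) (acc : List Int), 5 ≤ lo → (max_p - lo).toNat ≤ fuel →
      roundsB k max_count max_p fuel lo acc = scanA k max_count max_p (max_p - lo).toNat lo acc := by
  intro fuel
  induction fuel with
  | zero =>
    intro lo acc hlo5 hfuel
    have h0 : (max_p - lo).toNat = 0 := by omega
    rw [h0]
    rfl
  | succ fuel ih =>
    intro lo acc hlo5 hfuel
    simp only [roundsB]
    by_cases hlt : lo < max_p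
    · rw [if_pos hlt]
      have hhi5 : 5 ≤ min (lo * 2) max_p := by omega
      have hhile : min (lo * 2) max_p ≤ max_p := by omega
      have hcond : ∀ q : Int, 5 ≤ q → q < min (lo * 2) max_p →
          (sieve_upto (min (lo * 2) max_p)).getD q.toNat false
            = (is_prime q && !(q == 2) && !(q == 3)) := by
        intro q hq5 hqlt
        have h2 : (q == 2) = false := by simp; omega
        have h3 : (q == 3) = false := by simp; omega
        rw [h2, h3]
        simp only [Bool.not_false, Bool.and_true]
        rw [Bool.eq_iff_iff, sieve_getD _ q (by omega) hqlt, isPrime_iff q hq5]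
        exact ⟨fun h => h.2, fun h => ⟨by omega, h⟩⟩
      rw [seg_eq k max_count max_p (min (lo * 2) max_p) _ hhile hcond
            (min (lo * 2) max_p - lo).toNat lo acc hlo5 (by omega) (le_refl _)]
      cases hseg : scanSeg k max_count (sieve_upto (min (lo * 2) max_p))
          (PySem.List.pyRange lo (min (lo * 2) max_p) 1) acc with
      | mk acc' done =>
        cases done with
        | true => rfl
        | false => exact ih (min (lo * 2) max_p) acc' (by omega) (by omega)
    · rw [if_neg hlt]
      have h0 : (max_p - lo).toNat = 0 := by omega
      rw [h0]
      rfl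

-- ===== VERDICT (by name: the statement is the Claim_ definition above) =====
theorem find_R1_primes_spec : Claim_equal_find_R1_primes := by
  intro k max_p max_count _ _
  unfold Spec_find_R1_primes find_R1_primes find_R1_primes_alt
  exact (rounds_eq k max_count max_p (max_p - 5).toNat 5 [] (by norm_num) (le_refl _)).symm

@[simp] theorem find_R1_primes_raises : Claim_raises_find_R1_primes := by
  unfold Claim_raises_find_R1_primes
  refine ⟨?_, by decide⟩
  intro k mp mc _ hr hpre
  unfold Raises_find_R1_primes at hr
  unfold Pre_find_R1_primes at hpre
  omega
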